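-- pv_equiv track=rewrite | github.com/SkyITL/HiMCM-2025-17235-Codebase | optimal_rescue_optimizer.py | _generate_vectors
-- ===== SOURCE A (Python) =====
-- from typing import Dict, List, Tuple, Optional
--
-- def _generate_vectors(
--
--     rooms: Tuple[str, ...],
--     k: int,
--     discovered: Dict[str, Dict]
-- ) -> List[Dict[str, int]]:
--     """
--     Generate all valid vectors for given room combination.
--
--     A vector is a distribution of rescue counts across rooms.
--     Constraints:
--     - sum(counts) ≤ k (firefighter capacity)
--     - count[room] ≤ incapable_count[room] (can't rescue more than exist)
--
--     Args:
--         rooms: Tuple of room IDs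
--         k: Maximum total people to rescue
--         discovered: discovered_occupants from state
--
--     Returns:
--         List of vectors: [{room_id: count}, ...]
--
--     Example: rooms=(A, B), k=3, incapable={A:5, B:2}
--     Vectors: {A:1}, {A:2}, {A:3}, {B:1}, {B:2},
--             {A:1,B:1}, {A:1,B:2}, {A:2,B:1}
--     """
--     vectors = []
--
--     # Get max possible from each room
--     max_counts = {}
--     for room in rooms:
--         max_counts[room] = discovered[room]['incapable']
--
--     # Generate all valid distributions using recursive partitioning
--     def generate_partitions(
--         remaining_capacity: int,
--         remaining_rooms: List[str],
--         current_vector: Dict[str, int]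
--     ):
--         if not remaining_rooms:
--             # Base case: all rooms assigned
--             if sum(current_vector.values()) > 0:
--                 vectors.append(dict(current_vector))
--             return
--
--         room = remaining_rooms[0]
--         rest_rooms = remaining_rooms[1:]
--
--         # Try all possible counts for this room
--         max_for_room = min(max_counts[room], remaining_capacity)
--
--         for count in range(0, max_for_room + 1):
--             current_vector[room] = count
--             generate_partitions(
--                 remaining_capacity - count,
--                 rest_rooms,
--                 current_vector
--             )
--
--         # Backtrack
--         del current_vector[room]
--
--     generate_partitions(k, list(rooms), {})
--
--     return vectors
-- ===== SOURCE B (Python) =====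
-- from itertools import product
-- from typing import Dict, List, Tuple
--
--
-- def _generate_vectors(
--     rooms: Tuple[str, ...],
--     k: int,
--     discovered: Dict[str, Dict]
-- ) -> List[Dict[str, int]]:
--     """Flat Cartesian product over per-room count ranges, filtered by 0 < sum <= k."""
--     ranges = [range(0, discovered[room]['incapable'] + 1) for room in rooms]
--     return [dict(zip(rooms, combo))
--             for combo in product(*ranges)
--             if 0 < sum(combo) <= k]
-- ===== Notes on version B (the rewrite author's own statement) =====
-- stated objective: idiomatic
-- what changed: Replaces the recursive capacity-pruned backtracking over a mutated dict with a flat itertools.product over per-room count ranges filtered by 0 < sum <= k, building each vector with dict(zip(...)).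
import Mathlib
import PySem

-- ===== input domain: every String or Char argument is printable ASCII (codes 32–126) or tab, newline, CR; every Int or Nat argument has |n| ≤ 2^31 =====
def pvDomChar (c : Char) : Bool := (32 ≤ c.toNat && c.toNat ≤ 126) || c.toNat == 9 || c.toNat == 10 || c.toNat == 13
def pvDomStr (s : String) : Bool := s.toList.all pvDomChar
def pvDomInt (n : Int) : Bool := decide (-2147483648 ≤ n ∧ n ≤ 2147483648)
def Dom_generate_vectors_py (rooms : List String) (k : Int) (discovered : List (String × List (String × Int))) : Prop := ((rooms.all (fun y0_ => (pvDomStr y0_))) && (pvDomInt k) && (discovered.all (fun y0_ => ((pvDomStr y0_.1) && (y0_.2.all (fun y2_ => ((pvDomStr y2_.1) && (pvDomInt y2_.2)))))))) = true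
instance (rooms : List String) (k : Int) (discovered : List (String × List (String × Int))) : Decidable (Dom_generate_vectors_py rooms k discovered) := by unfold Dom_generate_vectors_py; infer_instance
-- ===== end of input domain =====

-- B replaces A's recursive capacity-pruned backtracking with a flat Cartesian product of per-room
-- count ranges filtered by 0 < sum ≤ k (objective: idiomatic; same output, order included).

-- ===== PORT A =====
-- discovered[room]['incapable']  (0 defaults are unreachable inside Pre_, where Python raises KeyError)
def pvInnerGet (disc : PySem.Dict String (List (String × Int))) (room : String) : Int :=
  (PySem.Dict.ofList (disc.getD room [])).getD "incapable" 0

-- generate_partitions: state = (vectors, current_vector); returns both (current_vector is mutated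
-- and backtracked in Python; the final erase is the 'del current_vector[room]').
def pvGenParts (maxCounts : PySem.Dict String Int) (cap : Int) (rems : List String)
    (cv : PySem.Dict String Int) (vecs : List (List (String × Int))) :
    List (List (String × Int)) × PySem.Dict String Int :=
  match rems with
  | [] => (if 0 < cv.values.sum then vecs ++ [cv.items] else vecs, cv)
  | room :: rest =>
    let maxFor := min (maxCounts.getD room 0) cap
    let p := (PySem.List.pyRange 0 (maxFor + 1) 1).foldl
      (fun st count => pvGenParts maxCounts (cap - count) rest (st.2.insert room count) st.1)
      (vecs, cv)
    (p.1, p.2.erase room)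

def generate_vectors_py (rooms : List String) (k : Int) (discovered : List (String × List (String × Int))) : List (List (String × Int)) :=
  let disc := PySem.Dict.ofList discovered
  let maxCounts := rooms.foldl (fun d room => d.insert room (pvInnerGet disc room)) PySem.Dict.empty
  (pvGenParts maxCounts k rooms PySem.Dict.empty []).1

-- ===== PORT B =====
-- itertools.product(*ranges), first factor most significant
def pvProduct (ranges : List (List Int)) : List (List Int) :=
  ranges.foldr (fun r acc => r.flatMap (fun c => acc.map (fun t => c :: t))) [[]]

def generate_vectors_py_alt (rooms : List String) (k : Int) (discovered : List (String × List (String × Int))) : List (List (String × Int)) :=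
  let disc := PySem.Dict.ofList discovered
  let ranges := rooms.map (fun room => PySem.List.pyRange 0 (pvInnerGet disc room + 1) 1)
  ((pvProduct ranges).filter (fun combo => decide (0 < combo.sum) && decide (combo.sum ≤ k))).map
    (fun combo => (PySem.Dict.ofList (rooms.zip combo)).items)

-- ===== PRECONDITION & SPEC =====
-- discovered[room]['incapable'], as an Option (input inspection only; not used by the ports)
def pvIncap? (discovered : List (String × List (String × Int))) (r : String) : Option Int :=
  ((PySem.Dict.ofList discovered).get? r).bind (fun inner => (PySem.Dict.ofList inner).get? "incapable")

-- Pre_ = exactly where Python A returns normally: with nonempty rooms A raises KeyError unless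
-- k ≥ 0, rooms has no duplicates (a duplicate makes the backtracking 'del' fire twice), and every
-- room has a nonnegative 'incapable' entry (missing key → KeyError on lookup; negative value makes
-- the count range empty so 'del' fires on a never-assigned key).  '0 ≤ getD (-1)' says: present and ≥ 0.
def Pre_generate_vectors_py (rooms : List String) (k : Int) (discovered : List (String × List (String × Int))) : Prop :=
  rooms = [] ∨
    (0 ≤ k ∧ rooms.Nodup ∧ ∀ r ∈ rooms, 0 ≤ (pvIncap? discovered r).getD (-1))
instance (rooms : List String) (k : Int) (discovered : List (String × List (String × Int))) : Decidable (Pre_generate_vectors_py rooms k discovered) := by unfold Pre_generate_vectors_py; infer_instance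

def pvWitness_generate_vectors_py : List String × Int × (List (String × List (String × Int))) :=
  (["A", "B"], 3, [("A", [("incapable", 2)]), ("B", [("incapable", 1)])])

def Spec_generate_vectors_py (rooms : List String) (k : Int) (discovered : List (String × List (String × Int))) (out : List (List (String × Int))) : Prop := out = generate_vectors_py_alt rooms k discovered
instance (rooms : List String) (k : Int) (discovered : List (String × List (String × Int))) (out : List (List (String × Int))) : Decidable (Spec_generate_vectors_py rooms k discovered out) := by unfold Spec_generate_vectors_py; infer_instance

-- ===== CLAIM (what is proved, stated in full; the proofs are below) =====
def Claim_equal_generate_vectors_py : Prop := ∀ (rooms : List String) (k : Int) (discovered : List (String × List (String × Int))), Dom_generate_vectors_py rooms k discovered → Pre_generate_vectors_py rooms k discovered → Spec_generate_vectors_py rooms k discovered (generate_vectors_py rooms k discovered)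


-- ===== LEMMAS AND PROOFS =====

-- capacity-pruned combinations (A's search tree) and the full product (B's), abstracted over the bounds
def pvPruned (m : String → Int) : Int → List String → List (List Int)
  | _, [] => [[]]
  | cap, r :: rest =>
    (PySem.List.pyRange 0 (min (m r) cap + 1) 1).flatMap
      (fun c => (pvPruned m (cap - c) rest).map (c :: ·))

def pvProd (m : String → Int) : List String → List (List Int)
  | [] => [[]]
  | r :: rest =>
    (PySem.List.pyRange 0 (m r + 1) 1).flatMap
      (fun c => (pvProd m rest).map (c :: ·))

lemma pv_items_beq_false {d : PySem.Dict String Int} {k : String}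
    (h : d.contains k = false) : ∀ p ∈ d.items, (p.1 == k) = false := by
  intro p hp
  cases hpk : (p.1 == k) with
  | false => rfl
  | true =>
    have hc : d.contains k = true := by
      simp only [PySem.Dict.contains]
      exact List.any_eq_true.mpr ⟨p, hp, hpk⟩
    rw [h] at hc
    exact absurd hc (by simp)

lemma pv_erase_not_contains {d : PySem.Dict String Int} {k : String}
    (h : d.contains k = false) : d.erase k = d := by
  apply PySem.Dict.ext
  show List.filter (fun p => !(p.1 == k)) d.items = d.items
  rw [List.filter_eq_self]
  intro p hp
  simp [pv_items_beq_false h p hp]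

lemma pv_erase_insert_fresh {d : PySem.Dict String Int} {k : String} {v : Int}
    (h : d.contains k = false) : (d.insert k v).erase k = d := by
  apply PySem.Dict.ext
  show List.filter (fun p => !(p.1 == k)) (d.insert k v).items = d.items
  rw [PySem.Dict.items_insert_of_not_contains d v h, List.filter_append, List.filter_eq_self.mpr
    (fun p hp => by simp [pv_items_beq_false h p hp])]
  simp

lemma pv_values_sum_insert_fresh {d : PySem.Dict String Int} {k : String} {v : Int}
    (h : d.contains k = false) : ((d.insert k v).values).sum = d.values.sum + v := by
  simp [PySem.Dict.values, PySem.Dict.items_insert_of_not_contains d v h]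

lemma pv_items_insert_fresh {d : PySem.Dict String Int} {k : String} {v : Int}
    (h : d.contains k = false) : (d.insert k v).items = d.items ++ [(k, v)] :=
  PySem.Dict.items_insert_of_not_contains d v h

lemma pv_filterMap_flatMap {α β γ : Type} (l : List α) (g : α → List β) (f : β → Option γ) :
    (l.flatMap g).filterMap f = l.flatMap (fun a => (g a).filterMap f) := by
  induction l with
  | nil => simp
  | cons a l ih => simp [List.flatMap_cons, List.filterMap_append, ih]

lemma pv_filter_flatMap {α β : Type} (l : List α) (g : α → List β) (p : β → Bool) :
    (l.flatMap g).filter p = l.flatMap (fun a => (g a).filter p) := by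
  induction l with
  | nil => simp
  | cons a l ih => simp [List.flatMap_cons, List.filter_append, ih]

lemma pv_filterMap_if {α β : Type} (X : List α) (p : α → Prop) [DecidablePred p] (G : α → β) :
    X.filterMap (fun c => if p c then some (G c) else none) =
      (X.filter (fun c => decide (p c))).map G := by
  induction X with
  | nil => simp
  | cons a X ih => by_cases h : p a <;> simp [h, ih]

lemma pv_genParts_eq (mc : PySem.Dict String Int) :
    ∀ (rems : List String) (cap : Int) (cv : PySem.Dict String Int)
      (vecs : List (List (String × Int))),
      rems.Nodup → (∀ r ∈ rems, cv.contains r = false) →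
      pvGenParts mc cap rems cv vecs =
        (vecs ++ (pvPruned (fun r => mc.getD r 0) cap rems).filterMap
          (fun combo => if 0 < cv.values.sum + combo.sum then
              some (cv.items ++ rems.zip combo) else none),
         cv) := by
  intro rems
  induction rems with
  | nil =>
    intro cap cv vecs _ _
    simp only [pvGenParts, pvPruned]
    by_cases h : 0 < cv.values.sum <;> simp [h]
  | cons room rest ih =>
    intro cap cv vecs hnd hcv
    have hroom : room ∉ rest := (List.nodup_cons.mp hnd).1
    have hrest : rest.Nodup := (List.nodup_cons.mp hnd).2
    have hcvroom : cv.contains room = false := hcv room (by simp)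
    have hcvrest : ∀ r ∈ rest, cv.contains r = false := fun r hr => hcv r (by simp [hr])
    have aux : ∀ (l : List Int) (vecs0 : List (List (String × Int))) (d : PySem.Dict String Int),
        (d = cv ∨ ∃ c0, d = cv.insert room c0) →
        (l.foldl (fun st count => pvGenParts mc (cap - count) rest (st.2.insert room count) st.1)
            (vecs0, d)).1
          = vecs0 ++ l.flatMap (fun c =>
              (pvPruned (fun r => mc.getD r 0) (cap - c) rest).filterMap
                (fun combo => if 0 < cv.values.sum + c + combo.sum then
                    some (cv.items ++ (room, c) :: rest.zip combo) else none)) ∧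
        ((l.foldl (fun st count => pvGenParts mc (cap - count) rest (st.2.insert room count) st.1)
            (vecs0, d)).2 = cv ∨
          ∃ c0, (l.foldl (fun st count =>
            pvGenParts mc (cap - count) rest (st.2.insert room count) st.1) (vecs0, d)).2 =
              cv.insert room c0) := by
      intro l
      induction l with
      | nil => intro vecs0 d hd; exact ⟨by simp, hd⟩
      | cons c l' ihl =>
        intro vecs0 d hd
        have hdc : d.insert room c = cv.insert room c := by
          rcases hd with rfl | ⟨c0, rfl⟩
          · rfl
          · exact PySem.Dict.insert_insert_self cv room c0 c
        have hcont : ∀ r ∈ rest, (cv.insert room c).contains r = false := by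
          intro r hr
          rw [PySem.Dict.contains_insert]
          have hne : r ≠ room := fun h => hroom (h ▸ hr)
          simp [hne, hcvrest r hr]
        have hstep : pvGenParts mc (cap - c) rest ((vecs0, d).2.insert room c) (vecs0, d).1 =
            (vecs0 ++ (pvPruned (fun r => mc.getD r 0) (cap - c) rest).filterMap
              (fun combo => if 0 < cv.values.sum + c + combo.sum then
                  some (cv.items ++ (room, c) :: rest.zip combo) else none),
             cv.insert room c) := by
          show pvGenParts mc (cap - c) rest (d.insert room c) vecs0 = _
          rw [hdc, ih (cap - c) (cv.insert room c) vecs0 hrest hcont]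
          rw [pv_values_sum_insert_fresh hcvroom, pv_items_insert_fresh hcvroom]
          simp only [List.append_assoc, List.singleton_append]
        rw [List.foldl_cons, hstep]
        obtain ⟨h1, h2⟩ := ihl (vecs0 ++ (pvPruned (fun r => mc.getD r 0) (cap - c) rest).filterMap
          (fun combo => if 0 < cv.values.sum + c + combo.sum then
              some (cv.items ++ (room, c) :: rest.zip combo) else none))
          (cv.insert room c) (Or.inr ⟨c, rfl⟩)
        refine ⟨?_, h2⟩
        rw [h1]
        simp [List.flatMap_cons, List.append_assoc]
    obtain ⟨h1, h2⟩ := aux (PySem.List.pyRange 0 (min (mc.getD room 0) cap + 1) 1) vecs cv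
      (Or.inl rfl)
    simp only [pvGenParts]
    refine Prod.ext ?_ ?_
    · rw [h1]
      show _ = vecs ++ _
      congr 1
      rw [pvPruned, pv_filterMap_flatMap]
      apply List.flatMap_congr
      intro c _
      rw [List.filterMap_map]
      apply List.filterMap_congr
      intro combo _
      simp only [Function.comp_apply, List.sum_cons, List.zip_cons_cons, ← Int.add_assoc]
    · rcases h2 with h2 | ⟨c0, h2⟩
      · rw [h2]; exact pv_erase_not_contains hcvroom
      · rw [h2]; exact pv_erase_insert_fresh hcvroom

lemma pv_prod_sum_nonneg (m : String → Int) :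
    ∀ (rems : List String) (combo : List Int), combo ∈ pvProd m rems → 0 ≤ combo.sum := by
  intro rems
  induction rems with
  | nil => intro combo h; simp [pvProd] at h; simp [h]
  | cons r rest ih =>
    intro combo h
    simp only [pvProd, List.mem_flatMap, List.mem_map] at h
    obtain ⟨c, hc, t, ht, rfl⟩ := h
    have hc0 : 0 ≤ c := (PySem.List.mem_pyRange_one.mp hc).1
    have := ih t ht
    simp only [List.sum_cons]
    omega

lemma pv_prod_length (m : String → Int) :
    ∀ (rems : List String) (combo : List Int), combo ∈ pvProd m rems →
      combo.length = rems.length := by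
  intro rems
  induction rems with
  | nil => intro combo h; simp [pvProd] at h; simp [h]
  | cons r rest ih =>
    intro combo h
    simp only [pvProd, List.mem_flatMap, List.mem_map] at h
    obtain ⟨c, _, t, ht, rfl⟩ := h
    simp [ih t ht]

lemma pv_prod_congr (m m' : String → Int) :
    ∀ (rems : List String), (∀ r ∈ rems, m r = m' r) → pvProd m rems = pvProd m' rems := by
  intro rems
  induction rems with
  | nil => intro _; rfl
  | cons r rest ih =>
    intro h
    simp only [pvProd]
    rw [h r (by simp), ih (fun x hx => h x (by simp [hx]))]

lemma pv_pruned_eq_filter (m : String → Int) :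
    ∀ (rems : List String) (cap : Int), 0 ≤ cap → (∀ r ∈ rems, 0 ≤ m r) →
      pvPruned m cap rems = (pvProd m rems).filter (fun combo => decide (combo.sum ≤ cap)) := by
  intro rems
  induction rems with
  | nil => intro cap hcap _; simp [pvPruned, pvProd, List.filter, hcap]
  | cons r rest ih =>
    intro cap hcap hm
    have hmr : 0 ≤ m r := hm r (by simp)
    have hmrest : ∀ x ∈ rest, 0 ≤ m x := fun x hx => hm x (by simp [hx])
    rw [pvProd, pv_filter_flatMap, pvPruned,
      PySem.List.pyRange_one_append 0 (min (m r) cap + 1) (m r + 1) (by omega) (by omega),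
      List.flatMap_append]
    have h2 : (PySem.List.pyRange (min (m r) cap + 1) (m r + 1) 1).flatMap
        (fun c => ((pvProd m rest).map (c :: ·)).filter
          (fun combo => decide (combo.sum ≤ cap))) = [] := by
      rw [List.flatMap_eq_nil_iff]
      intro c hc
      obtain ⟨hge, hlt⟩ := PySem.List.mem_pyRange_one.mp hc
      by_cases hmc : m r ≤ cap
      · omega
      · rw [List.filter_eq_nil_iff]
        intro combo hcombo
        rw [List.mem_map] at hcombo
        obtain ⟨t, ht, rfl⟩ := hcombo
        have hts := pv_prod_sum_nonneg m rest t ht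
        simp only [List.sum_cons, decide_eq_true_eq]
        omega
    rw [h2, List.append_nil]
    apply List.flatMap_congr
    intro c hc
    obtain ⟨h0c, hcl⟩ := PySem.List.mem_pyRange_one.mp hc
    rw [List.filter_map, List.filter_congr (q := fun t => decide (t.sum ≤ cap - c))
      (by intro t _; simp only [Function.comp_apply, List.sum_cons, decide_eq_decide]; omega)]
    rw [← ih (cap - c) (by omega) hmrest]

lemma pv_foldl_insert_getD_notmem (f : String → Int) :
    ∀ (l : List String) (d : PySem.Dict String Int) (r : String), r ∉ l →
      ((l.foldl (fun d room => d.insert room (f room)) d).getD r 0) = d.getD r 0 := by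
  intro l
  induction l with
  | nil => intro d r _; rfl
  | cons a l ih =>
    intro d r hr
    rw [List.foldl_cons, ih (d.insert a (f a)) r (fun h => hr (by simp [h])),
      PySem.Dict.getD_insert_of_ne d (f a) 0 (fun h => hr (by simp [h]))]

lemma pv_foldl_insert_getD (f : String → Int) :
    ∀ (l : List String) (d : PySem.Dict String Int) (r : String), l.Nodup → r ∈ l →
      ((l.foldl (fun d room => d.insert room (f room)) d).getD r 0) = f r := by
  intro l
  induction l with
  | nil => intro _ _ _ h; simp at h
  | cons a l ih =>
    intro d r hnd hr
    rw [List.foldl_cons]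
    rcases List.mem_cons.mp hr with rfl | hr'
    · rw [pv_foldl_insert_getD_notmem f l _ r (List.nodup_cons.mp hnd).1,
        PySem.Dict.getD_insert_self]
    · exact ih _ r (List.nodup_cons.mp hnd).2 hr'

lemma pv_update_items_fresh :
    ∀ (pairs : List (String × Int)) (d : PySem.Dict String Int),
      (pairs.map Prod.fst).Nodup → (∀ p ∈ pairs, d.contains p.1 = false) →
      (d.update pairs).items = d.items ++ pairs := by
  intro pairs
  induction pairs with
  | nil => intro d _ _; simp [PySem.Dict.update]
  | cons p ps ih =>
    intro d hnd hfresh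
    rw [List.map_cons] at hnd
    obtain ⟨h1, h2⟩ := List.nodup_cons.mp hnd
    have hstep : d.update (p :: ps) = (d.insert p.1 p.2).update ps := rfl
    have hfresh' : ∀ q ∈ ps, (d.insert p.1 p.2).contains q.1 = false := by
      intro q hq
      rw [PySem.Dict.contains_insert]
      have hne : q.1 ≠ p.1 := by
        intro h
        exact h1 (h ▸ List.mem_map_of_mem hq)
      simp [hne, hfresh q (by simp [hq])]
    rw [hstep, ih (d.insert p.1 p.2) h2 hfresh', pv_items_insert_fresh (hfresh p (by simp))]
    simp

lemma pv_ofList_items_of_nodup (pairs : List (String × Int))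
    (h : (pairs.map Prod.fst).Nodup) : (PySem.Dict.ofList pairs).items = pairs := by
  have : PySem.Dict.ofList pairs = PySem.Dict.empty.update pairs := rfl
  rw [this, pv_update_items_fresh pairs PySem.Dict.empty h
    (fun p _ => PySem.Dict.contains_empty p.1)]
  rfl

lemma pv_incap_get (discovered : List (String × List (String × Int))) (r : String) (v : Int)
    (h : pvIncap? discovered r = some v) :
    pvInnerGet (PySem.Dict.ofList discovered) r = v := by
  unfold pvIncap? at h
  cases hg : (PySem.Dict.ofList discovered).get? r with
  | none => rw [hg] at h; simp at h
  | some inner =>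
    rw [hg] at h
    simp only [Option.bind_some] at h
    unfold pvInnerGet
    rw [PySem.Dict.getD_of_get?_eq_some _ _ hg, PySem.Dict.getD_of_get?_eq_some _ _ h]

lemma pv_product_map (f : String → Int) :
    ∀ (rooms : List String),
      pvProduct (rooms.map (fun room => PySem.List.pyRange 0 (f room + 1) 1)) =
        pvProd f rooms := by
  intro rooms
  induction rooms with
  | nil => rfl
  | cons r rest ih => simp only [List.map_cons, pvProduct, List.foldr_cons, pvProd]
                      rw [← ih]; rfl

-- ===== VERDICT (by name: the statement is the Claim_ definition above) =====
theorem generate_vectors_py_spec : Claim_equal_generate_vectors_py := by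
  intro rooms k discovered _ hPre
  unfold Spec_generate_vectors_py
  rcases hPre with rfl | ⟨hk, hnd, hok⟩
  · simp [generate_vectors_py, generate_vectors_py_alt, pvGenParts, pvProduct,
      PySem.Dict.values, PySem.Dict.empty]
  · have hval : ∀ r ∈ rooms, ∃ v, pvIncap? discovered r = some v ∧ 0 ≤ v := by
      intro r hr
      have h0 := hok r hr
      cases hi : pvIncap? discovered r with
      | none => rw [hi] at h0; simp at h0
      | some v => rw [hi] at h0; simp at h0; exact ⟨v, rfl, h0⟩
    have hfpos : ∀ r ∈ rooms, 0 ≤ pvInnerGet (PySem.Dict.ofList discovered) r := by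
      intro r hr
      obtain ⟨v, hi, hv⟩ := hval r hr
      rw [pv_incap_get discovered r v hi]; exact hv
    set disc := PySem.Dict.ofList discovered with hdisc
    set mc := rooms.foldl (fun d room => d.insert room (pvInnerGet disc room)) PySem.Dict.empty
      with hmc
    have hmf : ∀ r ∈ rooms, mc.getD r 0 = pvInnerGet disc r := by
      intro r hr
      rw [hmc]
      exact pv_foldl_insert_getD (fun room => pvInnerGet disc room) rooms PySem.Dict.empty r
        hnd hr
    have hA : generate_vectors_py rooms k discovered =
        (pvPruned (fun r => mc.getD r 0) k rooms).filterMap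
          (fun combo => if 0 < combo.sum then some (rooms.zip combo) else none) := by
      show (pvGenParts mc k rooms PySem.Dict.empty []).1 = _
      rw [pv_genParts_eq mc rooms k PySem.Dict.empty [] hnd
        (fun r _ => PySem.Dict.contains_empty r)]
      simp [PySem.Dict.values, PySem.Dict.empty]
    have hB : generate_vectors_py_alt rooms k discovered =
        ((pvProd (fun room => pvInnerGet disc room) rooms).filter
          (fun combo => decide (0 < combo.sum) && decide (combo.sum ≤ k))).map
            (fun combo => rooms.zip combo) := by
      show ((pvProduct (rooms.map (fun room => PySem.List.pyRange 0 (pvInnerGet disc room + 1) 1))).filter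
          (fun combo => decide (0 < combo.sum) && decide (combo.sum ≤ k))).map
            (fun combo => (PySem.Dict.ofList (rooms.zip combo)).items) = _
      rw [pv_product_map (fun room => pvInnerGet disc room) rooms]
      apply List.map_congr_left
      intro combo hc
      have hmem := List.mem_of_mem_filter hc
      have hlen := pv_prod_length _ rooms combo hmem
      have hfst : (rooms.zip combo).map Prod.fst = rooms :=
        List.map_fst_zip (by omega)
      exact pv_ofList_items_of_nodup (rooms.zip combo) (by rw [hfst]; exact hnd)
    rw [hA, hB]
    rw [pv_pruned_eq_filter (fun r => mc.getD r 0) rooms k hk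
      (fun r hr => by show 0 ≤ mc.getD r 0; rw [hmf r hr]; exact hfpos r hr)]
    rw [pv_prod_congr (fun r => mc.getD r 0) (fun room => pvInnerGet disc room) rooms hmf]
    rw [pv_filterMap_if _ (fun combo => 0 < List.sum combo) (fun combo => rooms.zip combo)]
    rw [List.filter_filter]
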